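-- pv_equiv track=rewrite | github.com/FServais/IEEEXtreme-2015 | bunny_and_snake/main.py | get_shortcuts
-- ===== SOURCE A (Python) =====
-- def sq2lin(square_board):
--     lin_board = []
--     for i, row in enumerate(reversed(square_board)):
--         lin_board += row if i % 2 == 0 else reversed(row)
--     return lin_board
--
-- def get_shortcuts(board):
--     lin_board = sq2lin(board)
--     bunnies_tmp = {}
--     snakes_tmp = {}
--     for i, slot in enumerate(lin_board):
--         if slot.isalpha():
--             if slot not in snakes_tmp:
--                 snakes_tmp[slot] = [-1, i + 1]
--             else:
--                 snakes_tmp[slot][0] = i + 1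
--         elif slot.isdigit():
--             if slot not in bunnies_tmp:
--                 bunnies_tmp[slot] = [i + 1, -1]
--             else:
--                 bunnies_tmp[slot][1] = i + 1
--
--     shortcuts = {}
--     for bunny in bunnies_tmp:
--         shortcuts[bunnies_tmp[bunny][0]] = bunnies_tmp[bunny][1]
--     for bunny in snakes_tmp:
--         shortcuts[snakes_tmp[bunny][0]] = snakes_tmp[bunny][1]
--     return shortcuts
-- ===== SOURCE B (Python) =====
-- def get_shortcuts(board):
--     # Flatten boustrophedon: bottom row first, every other row reversed.
--     lin = []
--     for i, row in enumerate(reversed(board)):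
--         lin += row if i % 2 == 0 else list(reversed(row))
--     n = len(lin)
--     # Distinct snake/bunny symbols in order of first appearance.
--     seen = list(dict.fromkeys([s for s in lin if s.isalpha() or s.isdigit()]))
--     rev = lin[::-1]
--     # Per symbol, locate its endpoints by searching the flat board directly.
--     shortcuts = {}
--     for s in seen:
--         if s.isdigit():
--             last = (n - rev.index(s)) if lin.count(s) > 1 else -1
--             shortcuts[lin.index(s) + 1] = last
--     for s in seen:
--         if s.isalpha():
--             last = (n - rev.index(s)) if lin.count(s) > 1 else -1
--             shortcuts[last] = lin.index(s) + 1
--     return shortcuts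
-- ===== Notes on version B (the rewrite author's own statement) =====
-- stated objective: alternative
-- what changed: Replaces A's one-pass pair of recorder dicts (sentinel pairs mutated per occurrence) by a per-symbol search: collect the distinct snake/bunny symbols with dict.fromkeys, then obtain each symbol's endpoints directly with index(), reversed index() and count() over the flat board; this trades A's single pass for simpler per-symbol scans that cost O(n*k).
import Mathlib
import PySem

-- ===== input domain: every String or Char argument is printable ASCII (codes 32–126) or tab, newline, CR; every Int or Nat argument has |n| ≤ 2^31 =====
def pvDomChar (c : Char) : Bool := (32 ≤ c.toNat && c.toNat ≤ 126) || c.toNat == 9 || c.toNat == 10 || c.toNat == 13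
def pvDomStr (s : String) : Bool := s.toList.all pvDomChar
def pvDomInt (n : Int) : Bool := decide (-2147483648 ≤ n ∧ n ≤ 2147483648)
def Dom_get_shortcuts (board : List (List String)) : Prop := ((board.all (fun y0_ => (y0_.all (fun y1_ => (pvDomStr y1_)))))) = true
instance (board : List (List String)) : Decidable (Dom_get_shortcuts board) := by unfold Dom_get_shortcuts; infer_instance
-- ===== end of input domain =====

-- B drops A's one-pass recorder dicts: it lists the distinct symbols, then finds each
-- symbol's endpoints by direct index/count searches of the flat board (objective: alternative).


-- ===== PORT A =====
def sq2lin (square_board : List (List String)) : List String :=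
  (PySem.List.enumerate square_board.reverse 0).foldl
    (fun lin p => lin ++ (if PySem.Int.mod p.1 2 = 0 then p.2 else p.2.reverse)) []

-- the body of A's first loop (named so the proofs can speak about one step)
def stepA (st : PySem.Dict String (Int × Int) × PySem.Dict String (Int × Int))
    (p : Int × String) : PySem.Dict String (Int × Int) × PySem.Dict String (Int × Int) :=
  if PySem.Str.strIsalpha p.2 then
    if st.2.contains p.2 = false then (st.1, st.2.insert p.2 (-1, p.1 + 1))
    else (st.1, st.2.modify p.2 (0, 0) (fun v => (p.1 + 1, v.2)))
  else if PySem.Str.strIsdigit p.2 then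
    if st.1.contains p.2 = false then (st.1.insert p.2 (p.1 + 1, -1), st.2)
    else (st.1.modify p.2 (0, 0) (fun v => (v.1, p.1 + 1)), st.2)
  else st

def get_shortcuts (board : List (List String)) : List (Int × Int) :=
  let lin_board := sq2lin board
  let tmp := (PySem.List.enumerate lin_board 0).foldl stepA (PySem.Dict.empty, PySem.Dict.empty)
  -- 'for bunny in bunnies_tmp: shortcuts[bunnies_tmp[bunny][0]] = bunnies_tmp[bunny][1]'
  -- (iterating the keys and looking each one up = iterating the items)
  let shortcuts := tmp.1.items.foldl
      (fun (d : PySem.Dict Int Int) kv => d.insert kv.2.1 kv.2.2) PySem.Dict.empty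
  let shortcuts := tmp.2.items.foldl
      (fun (d : PySem.Dict Int Int) kv => d.insert kv.2.1 kv.2.2) shortcuts
  shortcuts.items

-- ===== PORT B =====
def get_shortcuts_alt (board : List (List String)) : List (Int × Int) :=
  let lin := (PySem.List.enumerate board.reverse 0).foldl
      (fun acc p => acc ++ (if PySem.Int.mod p.1 2 = 0 then p.2 else p.2.reverse)) []
  let n : Int := lin.length
  -- list(dict.fromkeys(...)) = ordered dedup (PySem.List.dedup)
  let seen := PySem.List.dedup (lin.filter (fun s => PySem.Str.strIsalpha s || PySem.Str.strIsdigit s))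
  let rev := lin.reverse
  -- lin.index(s) / rev.index(s): s ∈ seen ⊆ lin, so the searches succeed (.getD 0 is dead)
  let shortcuts := seen.foldl
      (fun (d : PySem.Dict Int Int) s =>
        if PySem.Str.strIsdigit s then
          d.insert (((PySem.List.index? lin s).getD 0 : Int) + 1)
            (if 1 < lin.count s then n - ((PySem.List.index? rev s).getD 0 : Int) else -1)
        else d) PySem.Dict.empty
  let shortcuts := seen.foldl
      (fun (d : PySem.Dict Int Int) s =>
        if PySem.Str.strIsalpha s then
          d.insert (if 1 < lin.count s then n - ((PySem.List.index? rev s).getD 0 : Int) else -1)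
            (((PySem.List.index? lin s).getD 0 : Int) + 1)
        else d) shortcuts
  shortcuts.items

-- ===== PRECONDITION & SPEC =====
def Spec_get_shortcuts (board : List (List String)) (out : List (Int × Int)) : Prop := out = get_shortcuts_alt board
instance (board : List (List String)) (out : List (Int × Int)) : Decidable (Spec_get_shortcuts board out) := by unfold Spec_get_shortcuts; infer_instance

-- ===== CLAIM (what is proved, stated in full; the proofs are below) =====
def Claim_equal_get_shortcuts : Prop := ∀ (board : List (List String)), Dom_get_shortcuts board → Spec_get_shortcuts board (get_shortcuts board)

-- ===== LEMMAS AND PROOFS =====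

-- generic "first/last recorder" step: what A's first loop does per symbol class
def rstep {V : Type} (init : Int → V) (upd : Int → V → V) (dflt : V)
    (d : PySem.Dict String V) (p : Int × String) : PySem.Dict String V :=
  if d.contains p.2 = false then d.insert p.2 (init p.1) else d.modify p.2 dflt (fun v => upd p.1 v)

def bstep : PySem.Dict String (Int × Int) → Int × String → PySem.Dict String (Int × Int) :=
  rstep (fun i => (i + 1, -1)) (fun j v => (v.1, j + 1)) (0, 0)
def sstep : PySem.Dict String (Int × Int) → Int × String → PySem.Dict String (Int × Int) :=
  rstep (fun i => (-1, i + 1)) (fun j v => (j + 1, v.2)) (0, 0)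

-- positions (0-based) at which symbol s occurs in the enumerated list
def posOf (L : List (Int × String)) (s : String) : List Int :=
  (L.filter (fun p => p.2 == s)).map Prod.fst

-- the value a recorder holds for a symbol with occurrence positions ps
def vOf {V : Type} (init : Int → V) (upd : Int → V → V) : List Int → V
  | [] => init 0
  | i :: rest => rest.foldl (fun v j => upd j v) (init i)

theorem alpha_not_digit (s : String) (h : PySem.Str.strIsalpha s = true) :
    PySem.Str.strIsdigit s = false := by
  simp only [PySem.Str.strIsalpha, PySem.Chars.strIsalpha, Bool.and_eq_true,
    Bool.not_eq_true', List.isEmpty_eq_false_iff, List.all_eq_true] at h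
  obtain ⟨hne, hall⟩ := h
  rcases List.exists_mem_of_ne_nil _ hne with ⟨c, hc⟩
  have h1 := hall c hc
  cases hd : PySem.Str.strIsdigit s with
  | false => rfl
  | true =>
    exfalso
    simp only [PySem.Str.strIsdigit, PySem.Chars.strIsdigit, Bool.and_eq_true,
      List.all_eq_true] at hd
    have h2 := hd.2 c hc
    simp [PySem.Chars.isalpha, PySem.Chars.isupper, PySem.Chars.islower,
      PySem.Chars.isdigit, Char.le_def, UInt32.le_iff_toNat_le] at h1 h2
    omega

-- A's fold splits into two independent recorder folds
theorem split_fold (L : List (Int × String)) (b s : PySem.Dict String (Int × Int)) :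
    L.foldl stepA (b, s)
      = ((L.filter (fun p => PySem.Str.strIsdigit p.2)).foldl bstep b,
         (L.filter (fun p => PySem.Str.strIsalpha p.2)).foldl sstep s) := by
  induction L generalizing b s with
  | nil => rfl
  | cons p t ih =>
    rw [List.foldl_cons, List.filter_cons, List.filter_cons]
    by_cases ha : PySem.Str.strIsalpha p.2 = true
    · have hd : PySem.Str.strIsdigit p.2 = false := alpha_not_digit _ ha
      have hstep : stepA (b, s) p = (b, sstep s p) := by
        simp only [stepA, sstep, rstep, ha, if_pos]
        split_ifs <;> rfl
      rw [hstep, ha, hd]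
      simp only [if_pos, Bool.false_eq_true, if_false]
      rw [List.foldl_cons]
      exact ih b (sstep s p)
    · simp only [Bool.not_eq_true] at ha
      by_cases hd : PySem.Str.strIsdigit p.2 = true
      · have hstep : stepA (b, s) p = (bstep b p, s) := by
          simp only [stepA, bstep, rstep, ha, hd, Bool.false_eq_true, if_false, if_pos]
          split_ifs <;> rfl
        rw [hstep, ha, hd]
        simp only [if_pos, Bool.false_eq_true, if_false]
        rw [List.foldl_cons]
        exact ih (bstep b p) s
      · simp only [Bool.not_eq_true] at hd
        have hstep : stepA (b, s) p = (b, s) := by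
          simp only [stepA, ha, hd, Bool.false_eq_true, if_false]
        rw [hstep, ha, hd]
        simp only [Bool.false_eq_true, if_false]
        exact ih b s

theorem posOf_concat (L : List (Int × String)) (p : Int × String) (s : String) :
    posOf (L ++ [p]) s = posOf L s ++ (if (p.2 == s) = true then [p.1] else []) := by
  simp only [posOf, List.filter_append, List.map_append]
  congr 1
  by_cases h : (p.2 == s) = true <;> simp [List.filter, h]

theorem posOf_nil (L : List (Int × String)) (s : String) (h : s ∉ L.map Prod.snd) :
    posOf L s = [] := by
  have hf : L.filter (fun p => p.2 == s) = [] := by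
    rw [List.filter_eq_nil_iff]
    intro p hp hbeq
    exact h (List.mem_map.mpr ⟨p, hp, eq_of_beq hbeq⟩)
  simp [posOf, hf]

theorem posOf_ne_nil (L : List (Int × String)) (s : String) (h : s ∈ L.map Prod.snd) :
    posOf L s ≠ [] := by
  obtain ⟨p, hp, hps⟩ := List.mem_map.mp h
  have hmem : p ∈ L.filter (fun p => p.2 == s) := List.mem_filter.mpr ⟨hp, by simp [hps]⟩
  intro hcontra
  rw [posOf, List.map_eq_nil_iff] at hcontra
  rw [hcontra] at hmem
  exact absurd hmem (List.not_mem_nil)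

theorem vOf_concat {V : Type} (init : Int → V) (upd : Int → V → V) (ps : List Int) (i : Int)
    (h : ps ≠ []) : vOf init upd (ps ++ [i]) = upd i (vOf init upd ps) := by
  cases ps with
  | nil => exact absurd rfl h
  | cons j rest => simp [vOf, List.foldl_append]

theorem dedup_concat (X : List String) (x : String) :
    PySem.List.dedup (X ++ [x])
      = if x ∈ X then PySem.List.dedup X else PySem.List.dedup X ++ [x] := by
  have h1 : PySem.List.dedup (X ++ [x]) = PySem.Set.add (PySem.List.dedup X) x := by
    simp [PySem.List.dedup, PySem.Set.ofList, List.foldl_append]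
  rw [h1, PySem.Set.add]
  by_cases hx : x ∈ X
  · rw [if_pos ((PySem.Set.contains_iff _ x).mpr ((PySem.List.mem_dedup X x).mpr hx)), if_pos hx]
  · rw [if_neg (fun hc => hx ((PySem.List.mem_dedup X x).mp ((PySem.Set.contains_iff _ x).mp hc))),
      if_neg hx]

theorem recorder_items {V : Type} (init : Int → V) (upd : Int → V → V) (dflt : V)
    (L : List (Int × String)) :
    (L.foldl (rstep init upd dflt) PySem.Dict.empty).items
      = (PySem.List.dedup (L.map Prod.snd)).map (fun s => (s, vOf init upd (posOf L s))) := by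
  induction L using List.reverseRecOn with
  | nil => rfl
  | append_singleton L p ih =>
    rw [List.foldl_append, List.foldl_cons, List.foldl_nil]
    have hcontains : (L.foldl (rstep init upd dflt) PySem.Dict.empty).contains p.2 = true
        ↔ p.2 ∈ L.map Prod.snd := by
      simp [PySem.Dict.contains, ih, List.any_eq_true]
    have hmapsnd : (L ++ [p]).map Prod.snd = L.map Prod.snd ++ [p.2] := by
      simp
    have hkeysnd : (L.foldl (rstep init upd dflt) PySem.Dict.empty).keys
        = PySem.List.dedup (L.map Prod.snd) := by
      simp only [PySem.Dict.keys, ih, List.map_map]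
      simp [Function.comp_def]
    by_cases hx : p.2 ∈ L.map Prod.snd
    · have hc : (L.foldl (rstep init upd dflt) PySem.Dict.empty).contains p.2 = true :=
        hcontains.mpr hx
      rw [rstep, hc]
      simp only [Bool.true_eq_false, if_false]
      rw [PySem.Dict.modify]
      have hgd : (L.foldl (rstep init upd dflt) PySem.Dict.empty).getD p.2 dflt
          = vOf init upd (posOf L p.2) := by
        apply PySem.Dict.getD_of_mem_items
        · rw [ih]
          exact List.mem_map.mpr ⟨p.2, (PySem.List.mem_dedup _ _).mpr hx, rfl⟩
        · rw [hkeysnd]; exact PySem.List.nodup_dedup _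
      rw [PySem.Dict.items_insert_of_contains _ _ hc, ih, hgd, hmapsnd,
        dedup_concat, if_pos hx, List.map_map]
      apply List.map_congr_left
      intro s hs
      by_cases hsp : s = p.2
      · rw [hsp]
        simp only [Function.comp, beq_self_eq_true, if_pos]
        rw [posOf_concat, if_pos (beq_self_eq_true p.2),
          vOf_concat _ _ _ _ (posOf_ne_nil L p.2 hx)]
      · have hbeq : (s == p.2) = false := beq_eq_false_iff_ne.mpr hsp
        have hbeq2 : (p.2 == s) = false := beq_eq_false_iff_ne.mpr (Ne.symm hsp)
        simp only [Function.comp, hbeq, Bool.false_eq_true, if_false]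
        rw [posOf_concat]
        simp [hbeq2]
    · have hc : (L.foldl (rstep init upd dflt) PySem.Dict.empty).contains p.2 = false := by
        cases hcb : (L.foldl (rstep init upd dflt) PySem.Dict.empty).contains p.2 with
        | false => rfl
        | true => exact absurd (hcontains.mp hcb) hx
      rw [rstep, hc]
      simp only [if_pos]
      rw [PySem.Dict.items_insert_of_not_contains _ _ hc, ih, hmapsnd,
        dedup_concat, if_neg hx, List.map_append]
      congr 1
      · apply List.map_congr_left
        intro s hs
        have hsp : s ≠ p.2 := fun h => hx (h ▸ (PySem.List.mem_dedup _ _).mp hs)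
        have hbeq2 : (p.2 == s) = false := beq_eq_false_iff_ne.mpr (Ne.symm hsp)
        rw [posOf_concat]
        simp [hbeq2]
      · simp only [List.map_cons, List.map_nil]
        rw [posOf_concat, if_pos (beq_self_eq_true p.2), posOf_nil L p.2 hx,
          List.nil_append]
        rfl

theorem posOf_append (L1 L2 : List (Int × String)) (s : String) :
    posOf (L1 ++ L2) s = posOf L1 s ++ posOf L2 s := by
  simp [posOf, List.filter_append]

theorem posOf_cons_self (t : Int) (L : List (Int × String)) (s : String) :
    posOf ((t, s) :: L) s = t :: posOf L s := by
  simp [posOf]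

theorem posOf_enum_nil (l : List String) (t : Int) (s : String) (h : s ∉ l) :
    posOf (PySem.List.enumerate l t) s = [] := by
  apply posOf_nil
  have h2 : (PySem.List.enumerate l t).map Prod.snd = l := PySem.List.map_snd_enumerate l t
  rw [h2]
  exact h

theorem posOf_filter (L : List (Int × String)) (q : String → Bool) (s : String)
    (hq : q s = true) : posOf (L.filter (fun p => q p.2)) s = posOf L s := by
  unfold posOf
  rw [List.filter_filter]
  congr 1
  apply List.filter_congr
  intro p _
  cases hb : (p.2 == s) with
  | true => simp [eq_of_beq hb, hq]
  | false => simp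

theorem map_snd_filter (L : List (Int × String)) (q : String → Bool) :
    (L.filter (fun p => q p.2)).map Prod.snd = (L.map Prod.snd).filter q := by
  rw [List.filter_map]
  rfl

theorem filter_dedup (l : List String) (q : String → Bool) :
    (PySem.List.dedup l).filter q = PySem.List.dedup (l.filter q) := by
  induction l using List.reverseRecOn with
  | nil => rfl
  | append_singleton l x ih =>
    rw [dedup_concat, List.filter_append]
    by_cases hx : x ∈ l
    · rw [if_pos hx]
      by_cases hq : q x = true
      · have hxf : x ∈ l.filter q := List.mem_filter.mpr ⟨hx, hq⟩
        simp only [List.filter, hq]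
        rw [dedup_concat, if_pos hxf]
        exact ih
      · simp only [Bool.not_eq_true] at hq
        simp only [List.filter, hq]
        rw [List.append_nil]
        exact ih
    · rw [if_neg hx, List.filter_append]
      by_cases hq : q x = true
      · have hxf : x ∉ l.filter q := fun hc => hx (List.mem_filter.mp hc).1
        simp only [List.filter, hq]
        rw [dedup_concat, if_neg hxf, ih]
      · simp only [Bool.not_eq_true] at hq
        simp only [List.filter, hq]
        rw [List.append_nil, List.append_nil]
        exact ih

theorem foldl_set_snd (rest : List Int) (j0 : Int) (h : rest.getLast? = some j0)
    (v : Int × Int) : rest.foldl (fun v j => (v.1, j + 1)) v = (v.1, j0 + 1) := by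
  induction rest generalizing v with
  | nil => simp at h
  | cons a t ih =>
    cases t with
    | nil =>
      simp only [List.getLast?_singleton, Option.some.injEq] at h
      simp [h]
    | cons b t2 =>
      rw [List.getLast?_cons_cons] at h
      rw [List.foldl_cons]
      exact ih h _

theorem foldl_set_fst (rest : List Int) (j0 : Int) (h : rest.getLast? = some j0)
    (v : Int × Int) : rest.foldl (fun v j => (j + 1, v.2)) v = (j0 + 1, v.2) := by
  induction rest generalizing v with
  | nil => simp at h
  | cons a t ih =>
    cases t with
    | nil =>
      simp only [List.getLast?_singleton, Option.some.injEq] at h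
      simp [h]
    | cons b t2 =>
      rw [List.getLast?_cons_cons] at h
      rw [List.foldl_cons]
      exact ih h _

theorem posOf_enum_length (lin : List String) (t : Int) (s : String) :
    (posOf (PySem.List.enumerate lin t) s).length = lin.count s := by
  unfold posOf
  rw [List.length_map, ← List.countP_eq_length_filter]
  conv_rhs => rw [← PySem.List.map_snd_enumerate lin t]
  rw [List.count_eq_countP, List.countP_map]
  rfl

theorem posOf_enum_head (lin : List String) (s : String) (k : Nat)
    (hk : PySem.List.index? lin s = some k) :
    ∃ tl, posOf (PySem.List.enumerate lin 0) s = (k : Int) :: tl := by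
  obtain ⟨pre, suf, hlin, hlen, hpre⟩ := (PySem.List.index?_eq_some_iff lin s k).mp hk
  subst hlin
  rw [PySem.List.enumerate_append, posOf_append, posOf_enum_nil pre 0 s hpre,
    List.nil_append, PySem.List.enumerate_cons, posOf_cons_self]
  refine ⟨posOf (PySem.List.enumerate suf (0 + (pre.length : Int) + 1)) s, ?_⟩
  congr 2
  omega

theorem posOf_enum_last (lin : List String) (s : String) (k' : Nat)
    (hk : PySem.List.index? lin.reverse s = some k') :
    k' < lin.length ∧
      (posOf (PySem.List.enumerate lin 0) s).getLast?
        = some ((lin.length - 1 - k' : Nat) : Int) := by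
  obtain ⟨pre, suf, hrev, hlen, hpre⟩ := (PySem.List.index?_eq_some_iff lin.reverse s k').mp hk
  have hlin : lin = suf.reverse ++ s :: pre.reverse := by
    have h2 := congrArg List.reverse hrev
    rw [List.reverse_reverse] at h2
    rw [h2]
    simp
  have hlength : lin.length = suf.length + 1 + pre.length := by
    rw [hlin]; simp; omega
  constructor
  · omega
  · rw [hlin, PySem.List.enumerate_append, posOf_append, PySem.List.enumerate_cons,
      posOf_cons_self, posOf_enum_nil pre.reverse _ s (by simpa using hpre)]
    rw [show posOf (PySem.List.enumerate suf.reverse 0) s ++ ((0 + (suf.reverse.length : Int)) :: [])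
        = posOf (PySem.List.enumerate suf.reverse 0) s ++ [(0 + (suf.reverse.length : Int))] from rfl]
    rw [List.getLast?_concat]
    congr 1
    simp only [List.length_reverse, List.length_append, List.length_cons]
    omega

-- the shared endpoint description of a symbol's positions, in B's index/count vocabulary
theorem endpoints (lin : List String) (s : String) (hs : s ∈ lin) :
    ∃ tl, posOf (PySem.List.enumerate lin 0) s
        = (((PySem.List.index? lin s).getD 0 : Int)) :: tl
      ∧ (tl = [] ↔ ¬ 1 < lin.count s)
      ∧ (tl ≠ [] → tl.getLast?
          = some ((lin.length : Int) - ((PySem.List.index? lin.reverse s).getD 0 : Int) - 1)) := by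
  obtain ⟨k, hk⟩ := Option.isSome_iff_exists.mp ((PySem.List.index?_isSome_iff lin s).mpr hs)
  obtain ⟨k', hk'⟩ := Option.isSome_iff_exists.mp
    ((PySem.List.index?_isSome_iff lin.reverse s).mpr (List.mem_reverse.mpr hs))
  obtain ⟨tl, htl⟩ := posOf_enum_head lin s k hk
  obtain ⟨hklt, hlast⟩ := posOf_enum_last lin s k' hk'
  have hlen : (posOf (PySem.List.enumerate lin 0) s).length = lin.count s :=
    posOf_enum_length lin 0 s
  rw [htl] at hlen hlast
  refine ⟨tl, by rw [htl, hk]; rfl, ?_, ?_⟩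
  · constructor
    · intro h
      rw [h] at hlen
      simp at hlen
      omega
    · intro h
      have hcpos : 1 ≤ lin.count s := List.one_le_count_iff.mpr hs
      have : lin.count s = 1 := by omega
      rw [this] at hlen
      simp at hlen
      cases tl with
      | nil => rfl
      | cons a t => simp at hlen
  · intro hne
    cases tl with
    | nil => exact absurd rfl hne
    | cons a t =>
      rw [List.getLast?_cons_cons] at hlast
      rw [hlast, hk']
      congr 1
      simp only [Option.getD_some]
      omega

theorem vBun (lin : List String) (s : String) (hs : s ∈ lin) :
    vOf (fun i => (i + 1, -1)) (fun j v => (v.1, j + 1))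
        (posOf (PySem.List.enumerate lin 0) s)
      = (((PySem.List.index? lin s).getD 0 : Int) + 1,
         if 1 < lin.count s
         then (lin.length : Int) - ((PySem.List.index? lin.reverse s).getD 0 : Int)
         else -1) := by
  obtain ⟨tl, hps, hnil, hlast⟩ := endpoints lin s hs
  rw [hps]
  by_cases hc : 1 < lin.count s
  · have htl : tl ≠ [] := fun h => (hnil.mp h) hc
    rw [if_pos hc]
    show tl.foldl (fun v j => (v.1, j + 1)) _ = _
    rw [foldl_set_snd tl _ (hlast htl)]
    congr 1
    ring
  · rw [if_neg hc, hnil.mpr hc]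
    rfl

theorem vSnk (lin : List String) (s : String) (hs : s ∈ lin) :
    vOf (fun i => (-1, i + 1)) (fun j v => (j + 1, v.2))
        (posOf (PySem.List.enumerate lin 0) s)
      = ((if 1 < lin.count s
          then (lin.length : Int) - ((PySem.List.index? lin.reverse s).getD 0 : Int)
          else -1),
         ((PySem.List.index? lin s).getD 0 : Int) + 1) := by
  obtain ⟨tl, hps, hnil, hlast⟩ := endpoints lin s hs
  rw [hps]
  by_cases hc : 1 < lin.count s
  · have htl : tl ≠ [] := fun h => (hnil.mp h) hc
    rw [if_pos hc]
    show tl.foldl (fun v j => (j + 1, v.2)) _ = _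
    rw [foldl_set_fst tl _ (hlast htl)]
    congr 1
    ring
  · rw [if_neg hc, hnil.mpr hc]
    rfl

theorem ports_agree (board : List (List String)) :
    get_shortcuts board = get_shortcuts_alt board := by
  unfold get_shortcuts get_shortcuts_alt sq2lin
  dsimp only
  generalize ((PySem.List.enumerate board.reverse 0).foldl
      (fun lin p => lin ++ (if PySem.Int.mod p.1 2 = 0 then p.2 else p.2.reverse)) []) = lin
  rw [split_fold]
  dsimp only
  simp only [bstep, sstep]
  rw [recorder_items, recorder_items]
  have hmapd : ((PySem.List.enumerate lin 0).filter (fun p => PySem.Str.strIsdigit p.2)).map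
      Prod.snd = lin.filter PySem.Str.strIsdigit := by
    rw [map_snd_filter]
    congr 1
    exact PySem.List.map_snd_enumerate lin 0
  have hmapa : ((PySem.List.enumerate lin 0).filter (fun p => PySem.Str.strIsalpha p.2)).map
      Prod.snd = lin.filter PySem.Str.strIsalpha := by
    rw [map_snd_filter]
    congr 1
    exact PySem.List.map_snd_enumerate lin 0
  rw [hmapd, hmapa]
  have hmd : (PySem.List.dedup (lin.filter PySem.Str.strIsdigit)).map
      (fun s => (s, vOf (fun i => (i + 1, -1)) (fun j v => (v.1, j + 1))
        (posOf ((PySem.List.enumerate lin 0).filter (fun p => PySem.Str.strIsdigit p.2)) s)))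
      = (PySem.List.dedup (lin.filter PySem.Str.strIsdigit)).map
      (fun s => (s, (((PySem.List.index? lin s).getD 0 : Int) + 1,
         if 1 < lin.count s
         then (lin.length : Int) - ((PySem.List.index? lin.reverse s).getD 0 : Int)
         else -1))) := by
    apply List.map_congr_left
    intro s hs
    have hsm := (PySem.List.mem_dedup _ _).mp hs
    obtain ⟨hmem, hq⟩ := List.mem_filter.mp hsm
    rw [posOf_filter _ _ _ hq, vBun lin s hmem]
  have hma : (PySem.List.dedup (lin.filter PySem.Str.strIsalpha)).map
      (fun s => (s, vOf (fun i => (-1, i + 1)) (fun j v => (j + 1, v.2))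
        (posOf ((PySem.List.enumerate lin 0).filter (fun p => PySem.Str.strIsalpha p.2)) s)))
      = (PySem.List.dedup (lin.filter PySem.Str.strIsalpha)).map
      (fun s => (s, ((if 1 < lin.count s
         then (lin.length : Int) - ((PySem.List.index? lin.reverse s).getD 0 : Int)
         else -1),
         ((PySem.List.index? lin s).getD 0 : Int) + 1))) := by
    apply List.map_congr_left
    intro s hs
    have hsm := (PySem.List.mem_dedup _ _).mp hs
    obtain ⟨hmem, hq⟩ := List.mem_filter.mp hsm
    rw [posOf_filter _ _ _ hq, vSnk lin s hmem]
  rw [hmd, hma, List.foldl_map, List.foldl_map]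
  rw [PySem.List.foldl_if_eq_foldl_filter, PySem.List.foldl_if_eq_foldl_filter]
  have hfd : (PySem.List.dedup (lin.filter
        (fun s => PySem.Str.strIsalpha s || PySem.Str.strIsdigit s))).filter
        PySem.Str.strIsdigit
      = PySem.List.dedup (lin.filter PySem.Str.strIsdigit) := by
    rw [filter_dedup, List.filter_filter]
    congr 1
    apply List.filter_congr
    intro s _
    cases PySem.Str.strIsdigit s <;> simp
  have hfa : (PySem.List.dedup (lin.filter
        (fun s => PySem.Str.strIsalpha s || PySem.Str.strIsdigit s))).filter
        PySem.Str.strIsalpha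
      = PySem.List.dedup (lin.filter PySem.Str.strIsalpha) := by
    rw [filter_dedup, List.filter_filter]
    congr 1
    apply List.filter_congr
    intro s _
    cases PySem.Str.strIsalpha s <;> simp
  rw [hfd, hfa]

-- ===== VERDICT (by name: the statement is the Claim_ definition above) =====
theorem get_shortcuts_spec : Claim_equal_get_shortcuts := by
  intro board _
  exact ports_agree board
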